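-- pv_equiv track=rewrite | github.com/soumya26-pi/extraction-tool | RSM_st.py | find_lexical_sequence_1
-- ===== SOURCE A (Python) =====
-- def find_lexical_sequence_1(indexes, w_indexes, value_check=False):
--     if len(indexes) == 0:
--         return []
--     check = len(set(indexes))
--     out = []
--     buffer = []
--     s = indexes[0]
--     for idx, i in enumerate(indexes[1:]):
--         if s - i == -1:
--             buffer.append(w_indexes[idx + 1])
--         else:
--             if len(buffer) > 0:
--                 out.append([w_indexes[w_indexes.index(buffer[0]) - 1]] + buffer)
--             buffer = []
--         s = i
--     if len(buffer) > 0 and buffer not in out: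
--         out.append([w_indexes[w_indexes.index(buffer[0]) - 1]] + buffer)
--     main_out = []
--     for l in out:
--         if len(l) == check:
--             if not value_check:
--                 if max(l) - min(l) <= len(l) - 1:
--                     main_out.append(l)
--             else:
--                 if max(l) - min(l) <= 10:
--                     main_out.append(l)
--
--     if value_check and len(sorted(set(indexes))) == 1 and len(main_out) == 0:
--         for i in w_indexes:
--             main_out.append([i, i])
--     return main_out
-- ===== SOURCE B (Python) =====
-- # Boundary-first re-implementation: compute break positions, slice into runs, then build/filter.
-- def find_lexical_sequence_1(indexes, w_indexes, value_check=False):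
--     n = len(indexes)
--     if n == 0:
--         return []
--     # positions k where indexes[k+1] does not continue indexes[k]
--     breaks = [k for k in range(n - 1) if indexes[k + 1] - indexes[k] != 1]
--     out = []
--     start = 0
--     for k in breaks:           # each completed run spans positions start..k
--         if k > start:
--             seg = w_indexes[start + 1 : k + 1]
--             out.append([w_indexes[w_indexes.index(seg[0]) - 1]] + seg)
--         start = k + 1
--     if n - 1 > start:          # trailing run, deduplicated against out
--         seg = w_indexes[start + 1 : n]
--         if seg not in out:
--             out.append([w_indexes[w_indexes.index(seg[0]) - 1]] + seg)
--     check = len(set(indexes))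
--     main_out = [l for l in out
--                 if len(l) == check and max(l) - min(l) <= (10 if value_check else len(l) - 1)]
--     if value_check and len(set(indexes)) == 1 and not main_out:
--         return [[i, i] for i in w_indexes]
--     return main_out
-- ===== Notes on version B (the rewrite author's own statement) =====
-- stated objective: alternative
-- what changed: A's single interleaved state machine (running buffer flushed on each break, plus a post-loop flush) is replaced by boundary detection first: one pass computes the break positions, a second pass slices w_indexes into per-run segments and builds the candidates, then the same filtering applies.
import Mathlib
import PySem

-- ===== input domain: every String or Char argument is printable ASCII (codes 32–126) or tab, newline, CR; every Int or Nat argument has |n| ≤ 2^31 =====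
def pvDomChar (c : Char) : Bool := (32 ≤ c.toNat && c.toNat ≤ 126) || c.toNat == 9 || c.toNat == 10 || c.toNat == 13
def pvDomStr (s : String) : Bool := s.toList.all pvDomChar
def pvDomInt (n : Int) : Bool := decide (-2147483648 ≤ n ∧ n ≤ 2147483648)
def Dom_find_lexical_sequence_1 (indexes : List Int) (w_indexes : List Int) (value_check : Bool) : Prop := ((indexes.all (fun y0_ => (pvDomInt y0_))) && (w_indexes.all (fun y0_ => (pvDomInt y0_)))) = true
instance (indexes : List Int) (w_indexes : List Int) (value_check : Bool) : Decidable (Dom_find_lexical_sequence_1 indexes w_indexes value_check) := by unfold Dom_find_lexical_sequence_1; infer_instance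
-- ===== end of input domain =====

-- B re-groups by boundary detection (break positions, then slices) instead of A's interleaved
-- buffer/flush state machine; same return value on every input where A returns (Pre_ excludes
-- exactly the inputs where A raises IndexError because w_indexes is too short).

-- ===== PORT A =====
-- shared Python fragment of both sources:  [w[w.index(seg[0]) - 1]] + seg  (index 0 wraps to w[-1])
def pvPrep (w : List Int) (seg : List Int) : List Int :=
  PySem.List.pyGetD w (((PySem.List.index? w (seg.headD 0)).getD 0 : Int) - 1) 0 :: seg

-- A's loop body: state = (out, buffer, s)
def pvStepA (w : List Int) (st : List (List Int) × List Int × Int) (p : Int × Int) :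
    List (List Int) × List Int × Int :=
  if st.2.2 - p.2 = -1 then (st.1, st.2.1 ++ [PySem.List.pyGetD w (p.1 + 1) 0], p.2)
  else ((if st.2.1.length > 0 then st.1 ++ [pvPrep w st.2.1] else st.1), [], p.2)

def find_lexical_sequence_1 (indexes : List Int) (w_indexes : List Int) (value_check : Bool) :
    List (List Int) :=
  if indexes.length = 0 then [] else
  let check := (PySem.Set.ofList indexes).length
  let st := (PySem.List.enumerate (PySem.List.slice indexes (some 1) none) 0).foldl
      (pvStepA w_indexes) ([], [], PySem.List.pyGetD indexes 0 0)
  let out := if st.2.1.length > 0 ∧ st.2.1 ∉ st.1 then st.1 ++ [pvPrep w_indexes st.2.1] else st.1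
  let main_out := out.foldl
      (fun acc l =>
        if l.length = check then
          if !value_check then
            if (PySem.List.max? l (fun y => y)).getD 0 - (PySem.List.min? l (fun y => y)).getD 0
                ≤ (l.length : Int) - 1 then acc ++ [l] else acc
          else
            if (PySem.List.max? l (fun y => y)).getD 0 - (PySem.List.min? l (fun y => y)).getD 0
                ≤ 10 then acc ++ [l] else acc
        else acc) ([] : List (List Int))
  if value_check = true ∧
      (PySem.List.sorted (PySem.Set.ofList indexes) (fun y => y) false).length = 1 ∧
      main_out.length = 0 then
    w_indexes.foldl (fun acc i => acc ++ [[i, i]]) main_out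
  else main_out

-- ===== PORT B =====
-- B's per-break loop body: state = (out, start)
def pvStepB (w : List Int) (st : List (List Int) × Nat) (k : Nat) : List (List Int) × Nat :=
  (if st.2 < k then
     st.1 ++ [pvPrep w (PySem.List.slice w (some ((st.2 + 1 : Nat) : Int)) (some ((k + 1 : Nat) : Int)))]
   else st.1, k + 1)

def find_lexical_sequence_1_alt (indexes : List Int) (w_indexes : List Int) (value_check : Bool) :
    List (List Int) :=
  let n := indexes.length
  if n = 0 then [] else
  let breaks := (List.range (n - 1)).filter
      (fun k => decide (indexes.getD (k + 1) 0 - indexes.getD k 0 ≠ 1))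
  let ps := breaks.foldl (pvStepB w_indexes) ([], 0)
  let out :=
    if ps.2 < n - 1 then
      let seg := PySem.List.slice w_indexes (some ((ps.2 + 1 : Nat) : Int)) (some ((n : Nat) : Int))
      if seg ∉ ps.1 then ps.1 ++ [pvPrep w_indexes seg] else ps.1
    else ps.1
  let check := (PySem.Set.ofList indexes).length
  let main_out := out.filter (fun l =>
      decide (l.length = check) &&
      decide ((PySem.List.max? l (fun y => y)).getD 0 - (PySem.List.min? l (fun y => y)).getD 0
        ≤ (if value_check then 10 else (l.length : Int) - 1)))
  if value_check = true ∧ (PySem.Set.ofList indexes).length = 1 ∧ main_out = [] then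
    w_indexes.map (fun i => [i, i])
  else main_out

-- ===== PRECONDITION & SPEC =====
-- Pre_ excludes exactly the inputs on which A raises IndexError: a consecutive pair at position k
-- (indexes[k+1] = indexes[k]+1) whose buffered access w_indexes[k+1] is out of range.
def Pre_find_lexical_sequence_1 (indexes : List Int) (w_indexes : List Int) (value_check : Bool) : Prop :=
  ∀ k ∈ List.range (indexes.length - 1),
    indexes.getD (k + 1) 0 = indexes.getD k 0 + 1 → k + 1 < w_indexes.length
instance (indexes : List Int) (w_indexes : List Int) (value_check : Bool) : Decidable (Pre_find_lexical_sequence_1 indexes w_indexes value_check) := by unfold Pre_find_lexical_sequence_1; infer_instance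

def pvWitness_find_lexical_sequence_1 : List Int × List Int × Bool := ([1, 2, 5], [10, 11, 12], false)

def Spec_find_lexical_sequence_1 (indexes : List Int) (w_indexes : List Int) (value_check : Bool) (out : List (List Int)) : Prop := out = find_lexical_sequence_1_alt indexes w_indexes value_check
instance (indexes : List Int) (w_indexes : List Int) (value_check : Bool) (out : List (List Int)) : Decidable (Spec_find_lexical_sequence_1 indexes w_indexes value_check out) := by unfold Spec_find_lexical_sequence_1; infer_instance

-- ===== CLAIM (what is proved, stated in full; the proofs are below) =====
def Claim_equal_find_lexical_sequence_1 : Prop := ∀ (indexes : List Int) (w_indexes : List Int) (value_check : Bool), Dom_find_lexical_sequence_1 indexes w_indexes value_check → Pre_find_lexical_sequence_1 indexes w_indexes value_check → Spec_find_lexical_sequence_1 indexes w_indexes value_check (find_lexical_sequence_1 indexes w_indexes value_check)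

-- ===== LEMMAS AND PROOFS =====

-- break positions among the first m gaps
def pvBrk (xs : List Int) (m : Nat) : List Nat :=
  (List.range m).filter (fun k => decide (xs.getD (k + 1) 0 - xs.getD k 0 ≠ 1))

-- B's state after folding over those breaks
def pvBst (w xs : List Int) (m : Nat) : List (List Int) × Nat :=
  (pvBrk xs m).foldl (pvStepB w) ([], 0)

-- the buffered segment of the run starting at `start`, seen up to gap m
def pvSeg (w : List Int) (start m : Nat) : List Int :=
  PySem.List.slice w (some ((start + 1 : Nat) : Int)) (some ((m + 1 : Nat) : Int))

lemma pvSeg_def (w : List Int) (start m : Nat) :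
    pvSeg w start m = (w.drop (start + 1)).take (m - start) := by
  unfold pvSeg
  rw [PySem.List.slice_natCast]
  congr 1
  omega

lemma pvSeg_len (w : List Int) (start m : Nat) (h : start < m → m < w.length) :
    (pvSeg w start m).length = m - start := by
  rw [pvSeg_def, List.length_take, List.length_drop]
  by_cases hs : start < m
  · have := h hs; omega
  · omega

lemma pvSeg_refl (w : List Int) (m : Nat) : pvSeg w m m = [] := by
  rw [pvSeg_def]; simp

lemma pvSeg_snoc (w : List Int) (start m : Nat) (hsm : start ≤ m) (hw : m + 1 < w.length) :
    pvSeg w start (m + 1) = pvSeg w start m ++ [w.getD (m + 1) 0] := by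
  rw [pvSeg_def, pvSeg_def]
  have h1 : m + 1 - start = (m - start) + 1 := by omega
  rw [h1, List.take_add_one]
  congr 1
  rw [List.getElem?_drop]
  have h2 : start + 1 + (m - start) = m + 1 := by omega
  rw [h2, List.getElem?_eq_getElem hw, List.getD_eq_getElem _ _ hw]
  rfl

lemma pvBrk_succ (xs : List Int) (m : Nat) :
    pvBrk xs (m + 1) = pvBrk xs m ++
      (if xs.getD (m + 1) 0 - xs.getD m 0 = 1 then [] else [m]) := by
  unfold pvBrk
  rw [List.range_succ, List.filter_append]
  congr 1
  by_cases h : xs.getD (m + 1) 0 - xs.getD m 0 = 1 <;>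
    simp only [List.getD_eq_getElem?_getD] at h <;>
    simp [h]

-- the main loop invariant: A's state after m gaps = B's breaks-fold view
lemma pvLoop (w xs : List Int)
    (hpre : ∀ k, k + 1 < xs.length → xs.getD (k + 1) 0 = xs.getD k 0 + 1 → k + 1 < w.length) :
    ∀ m, m + 1 ≤ xs.length →
      ((PySem.List.enumerate (xs.tail.take m) 0).foldl (pvStepA w) ([], [], xs.getD 0 0)
          = ((pvBst w xs m).1, pvSeg w (pvBst w xs m).2 m, xs.getD m 0))
      ∧ (pvBst w xs m).2 ≤ m
      ∧ (∀ k, (pvBst w xs m).2 ≤ k → k < m → xs.getD (k + 1) 0 - xs.getD k 0 = 1) := by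
  intro m
  induction m with
  | zero =>
      intro _
      refine ⟨?_, by simp [pvBst, pvBrk], by omega⟩
      simp [pvBst, pvBrk, pvSeg_refl, PySem.List.enumerate_nil]
  | succ m ih =>
      intro hm1
      have hm : m + 1 ≤ xs.length := by omega
      obtain ⟨hstate, hle, hrun⟩ := ih hm
      -- in-range facts on the current run
      have hinr : ∀ k, (pvBst w xs m).2 ≤ k → k < m → k + 1 < w.length := by
        intro k h1 h2
        exact hpre k (by omega) (by have := hrun k h1 h2; omega)
      -- split the enumerate list at position m
      have htl : m < xs.tail.length := by simp [List.length_tail]; omega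
      have htake : xs.tail.take (m + 1) = xs.tail.take m ++ [xs.getD (m + 1) 0] := by
        rw [List.take_add_one]
        congr 1
        rw [List.getElem?_tail, List.getElem?_eq_getElem (by omega),
            List.getD_eq_getElem _ _ (by omega)]
        rfl
      have hlen : (xs.tail.take m).length = m := by
        rw [List.length_take]; omega
      have hfold : (PySem.List.enumerate (xs.tail.take (m + 1)) 0).foldl (pvStepA w)
            ([], [], xs.getD 0 0)
          = pvStepA w ((pvBst w xs m).1, pvSeg w (pvBst w xs m).2 m, xs.getD m 0)
              ((m : Int), xs.getD (m + 1) 0) := by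
        rw [htake, PySem.List.enumerate_append, List.foldl_append, hstate,
            PySem.List.enumerate_cons, PySem.List.enumerate_nil, hlen]
        simp
      by_cases hd : xs.getD (m + 1) 0 - xs.getD m 0 = 1
      · -- consecutive: buffer grows, no new break
        have hbrk : pvBst w xs (m + 1) = pvBst w xs m := by
          unfold pvBst
          rw [pvBrk_succ, if_pos hd, List.append_nil]
        have hcond : xs.getD m 0 - xs.getD (m + 1) 0 = -1 := by omega
        have hw1 : m + 1 < w.length := hpre m (by omega) (by omega)
        refine ⟨?_, by rw [hbrk]; omega, ?_⟩
        · rw [hfold, hbrk]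
          unfold pvStepA
          simp only [if_pos hcond]
          rw [pvSeg_snoc w _ m hle hw1]
          have : PySem.List.pyGetD w ((m : Int) + 1) 0 = w.getD (m + 1) 0 := by
            have : ((m : Int) + 1) = ((m + 1 : Nat) : Int) := by push_cast; ring
            rw [this, PySem.List.pyGetD_natCast]
          simp [this]
        · intro k h1 h2
          rw [hbrk] at h1
          rcases Nat.lt_or_ge k m with h | h
          · exact hrun k h1 h
          · have : k = m := by omega
            subst this; omega
      · -- break at m: flush (if the run is nonempty), start := m+1
        have hbrk : pvBrk xs (m + 1) = pvBrk xs m ++ [m] := by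
          rw [pvBrk_succ, if_neg hd]
        have hbst : pvBst w xs (m + 1) = pvStepB w (pvBst w xs m) m := by
          unfold pvBst
          rw [hbrk, List.foldl_append]
          rfl
        have hcond : ¬ (xs.getD m 0 - xs.getD (m + 1) 0 = -1) := by omega
        have hseglen : (pvSeg w (pvBst w xs m).2 m).length = m - (pvBst w xs m).2 := by
          apply pvSeg_len
          intro hs
          have := hinr (m - 1) (by omega) (by omega)
          omega
        refine ⟨?_, by rw [hbst]; unfold pvStepB; simp, ?_⟩
        · rw [hfold, hbst]
          unfold pvStepA pvStepB
          simp only [if_neg hcond]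
          by_cases hs : (pvBst w xs m).2 < m
          · have hpos : (pvSeg w (pvBst w xs m).2 m).length > 0 := by omega
            simp only [if_pos hpos, if_pos hs]
            rw [pvSeg_refl]
            rfl
          · have hz : (pvSeg w (pvBst w xs m).2 m).length = 0 := by omega
            simp only [if_neg hs, if_neg (by omega : ¬ (pvSeg w (pvBst w xs m).2 m).length > 0)]
            rw [pvSeg_refl]
        · intro k h1 h2
          rw [hbst] at h1
          unfold pvStepB at h1
          simp at h1
          omega

-- the filter stage: A's append loop is a filter
lemma pvFilter (check : Nat) (vc : Bool) (out acc : List (List Int)) :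
    out.foldl
      (fun acc l =>
        if l.length = check then
          if !vc then
            if (PySem.List.max? l (fun y => y)).getD 0 - (PySem.List.min? l (fun y => y)).getD 0
                ≤ (l.length : Int) - 1 then acc ++ [l] else acc
          else
            if (PySem.List.max? l (fun y => y)).getD 0 - (PySem.List.min? l (fun y => y)).getD 0
                ≤ 10 then acc ++ [l] else acc
        else acc) acc
    = acc ++ out.filter (fun l =>
        decide (l.length = check) &&
        decide ((PySem.List.max? l (fun y => y)).getD 0 - (PySem.List.min? l (fun y => y)).getD 0
          ≤ (if vc then 10 else (l.length : Int) - 1))) := by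
  rw [← PySem.List.foldl_append_if_eq_filter]
  apply PySem.List.foldl_congr_mem
  intro a l _
  cases vc <;> by_cases h1 : l.length = check <;> simp [h1]

-- ===== VERDICT (by name: the statement is the Claim_ definition above) =====
theorem find_lexical_sequence_1_spec : Claim_equal_find_lexical_sequence_1 := by
  intro xs w vc _ hpre
  have hpre' : ∀ k, k + 1 < xs.length → xs.getD (k + 1) 0 = xs.getD k 0 + 1 → k + 1 < w.length := by
    intro k hk h
    exact hpre k (List.mem_range.mpr (by omega)) h
  unfold Spec_find_lexical_sequence_1 find_lexical_sequence_1 find_lexical_sequence_1_alt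
  by_cases hn : xs.length = 0
  · simp [hn]
  · obtain ⟨hstate, hle, hrun⟩ := pvLoop w xs hpre' (xs.length - 1) (by omega)
    have htt : xs.tail.take (xs.length - 1) = xs.tail := by
      rw [← List.length_tail]
      exact List.take_length
    rw [htt] at hstate
    simp only [if_neg hn, PySem.List.slice_from_one, PySem.List.pyGetD_zero, hstate]
    rw [show List.foldl (pvStepB w) ([], 0)
          (List.filter (fun k => decide (xs.getD (k + 1) 0 - xs.getD k 0 ≠ 1))
            (List.range (xs.length - 1))) = pvBst w xs (xs.length - 1) from rfl]
    have hseq : PySem.List.slice w (some ((pvBst w xs (xs.length - 1)).2 + 1 : Nat))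
          (some (xs.length : Nat))
        = pvSeg w (pvBst w xs (xs.length - 1)).2 (xs.length - 1) := by
      unfold pvSeg
      rw [Nat.sub_add_cancel (by omega : 1 ≤ xs.length)]
    rw [hseq]
    have hlen2 : (pvSeg w (pvBst w xs (xs.length - 1)).2 (xs.length - 1)).length
        = xs.length - 1 - (pvBst w xs (xs.length - 1)).2 := by
      apply pvSeg_len
      intro hs
      have hd := hrun (xs.length - 2) (by omega) (by omega)
      have := hpre' (xs.length - 2) (by omega) (by omega)
      omega
    have hout : (if (pvSeg w (pvBst w xs (xs.length - 1)).2 (xs.length - 1)).length > 0 ∧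
            pvSeg w (pvBst w xs (xs.length - 1)).2 (xs.length - 1) ∉ (pvBst w xs (xs.length - 1)).1 then
          (pvBst w xs (xs.length - 1)).1 ++
            [pvPrep w (pvSeg w (pvBst w xs (xs.length - 1)).2 (xs.length - 1))]
        else (pvBst w xs (xs.length - 1)).1)
        = (if (pvBst w xs (xs.length - 1)).2 < xs.length - 1 then
            if pvSeg w (pvBst w xs (xs.length - 1)).2 (xs.length - 1) ∉ (pvBst w xs (xs.length - 1)).1 then
              (pvBst w xs (xs.length - 1)).1 ++
                [pvPrep w (pvSeg w (pvBst w xs (xs.length - 1)).2 (xs.length - 1))]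
            else (pvBst w xs (xs.length - 1)).1
          else (pvBst w xs (xs.length - 1)).1) := by
      by_cases hs : (pvBst w xs (xs.length - 1)).2 < xs.length - 1
      · rw [if_pos hs]
        by_cases hmem : pvSeg w (pvBst w xs (xs.length - 1)).2 (xs.length - 1) ∉ (pvBst w xs (xs.length - 1)).1
        · rw [if_pos ⟨by omega, hmem⟩, if_pos hmem]
        · rw [if_neg (by tauto), if_neg hmem]
      · rw [if_neg hs, if_neg (fun h => hs (by omega))]
    rw [hout, pvFilter, List.nil_append]
    have hsorted := (PySem.List.sorted_perm (PySem.Set.ofList xs) (fun y => y) false).length_eq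
    set MO := List.filter
        (fun l =>
          decide (l.length = (PySem.Set.ofList xs).length) &&
            decide ((PySem.List.max? l fun y => y).getD 0 - (PySem.List.min? l fun y => y).getD 0 ≤
              if vc = true then 10 else (l.length : Int) - 1))
        (if (pvBst w xs (xs.length - 1)).2 < xs.length - 1 then
          if pvSeg w (pvBst w xs (xs.length - 1)).2 (xs.length - 1) ∉ (pvBst w xs (xs.length - 1)).1 then
            (pvBst w xs (xs.length - 1)).1 ++
              [pvPrep w (pvSeg w (pvBst w xs (xs.length - 1)).2 (xs.length - 1))]
          else (pvBst w xs (xs.length - 1)).1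
        else (pvBst w xs (xs.length - 1)).1) with hMO
    have hiff : (vc = true ∧
          (PySem.List.sorted (PySem.Set.ofList xs) (fun y => y) false).length = 1 ∧ MO.length = 0)
        ↔ (vc = true ∧ (PySem.Set.ofList xs).length = 1 ∧ MO = []) := by
      rw [hsorted, List.length_eq_zero_iff]
    by_cases hc : vc = true ∧ (PySem.Set.ofList xs).length = 1 ∧ MO = []
    · rw [if_pos (hiff.mpr hc), if_pos hc, hc.2.2,
        PySem.List.foldl_append_singleton_eq_map (fun i => ([i, i] : List Int))]
      rfl
    · rw [if_neg (fun h => hc (hiff.mp h)), if_neg hc]
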